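-- pv_equiv track=rewrite | github.com/informatics-isi-edu/deriva-mcp-core | src/deriva_mcp_core/rag/chunker.py | _last_sentence
-- ===== SOURCE A (Python) =====
-- def _last_sentence(text: str) -> str:
--     """Extract the last sentence from text for chunk overlap.
--
--     Finds the last sentence separator ('. ', '! ', '? ') and returns everything
--     after it. Falls back to the last 200 characters for very long texts with no
--     sentence separators.
--     """
--     text = text.strip()
--     last_sep = -1
--     for sep in (". ", "! ", "? "):
--         idx = text.rfind(sep)
--         if idx > last_sep:
--             last_sep = idx
--     if last_sep >= 0:
--         return text[last_sep + 2 :].strip()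
--     return text[-200:] if len(text) > 200 else text
-- ===== SOURCE B (Python) =====
-- def _last_sentence(text: str) -> str:
--     """Single reverse scan for the last '. '/'! '/'? ' boundary instead of three rfind passes."""
--     text = text.strip()
--     for i in range(len(text) - 2, -1, -1):
--         if text[i] in ".!?" and text[i + 1] == " ":
--             return text[i + 2:].strip()
--     return text[-200:] if len(text) > 200 else text
-- ===== Notes on version B (the rewrite author's own statement) =====
-- stated objective: alternative
-- what changed: Replaced A's three independent rfind scans combined by a running max with a single reverse character scan that returns at the first sentence boundary it meets.
import Mathlib
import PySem

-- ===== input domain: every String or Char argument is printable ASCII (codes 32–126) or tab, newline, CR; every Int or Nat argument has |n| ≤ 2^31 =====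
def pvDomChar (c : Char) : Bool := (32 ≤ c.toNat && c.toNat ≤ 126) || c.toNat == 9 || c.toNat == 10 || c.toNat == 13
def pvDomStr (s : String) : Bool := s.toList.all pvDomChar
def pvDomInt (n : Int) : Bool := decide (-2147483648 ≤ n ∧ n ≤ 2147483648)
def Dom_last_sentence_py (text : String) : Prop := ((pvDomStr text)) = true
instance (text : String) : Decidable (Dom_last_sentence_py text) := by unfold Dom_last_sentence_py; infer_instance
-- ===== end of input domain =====

-- B replaces A's three independent rfind scans plus a running max by ONE reverse character
-- scan that returns at the first sentence boundary found (objective: alternative).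

-- ===== PORT A =====
def last_sentence_py (text : String) : String :=
  let t := PySem.Str.strip text
  let lastSep : Int := [". ", "! ", "? "].foldl
    (fun last sep =>
      let idx := PySem.Str.rfind t sep
      if idx > last then idx else last) (-1)
  if lastSep ≥ 0 then
    PySem.Str.strip (PySem.Str.slice t (some (lastSep + 2)) none)
  else
    if (PySem.Str.len t : Int) > 200 then PySem.Str.slice t (some (-200)) none else t

-- ===== PORT B =====
-- B's test 'text[i] in ".!?" and text[i+1] == " "' (inside B's loop both indices are in
-- bounds; the Option read makes the Lean term total and never matches out of range)
def pvSepAt (cs : List Char) (i : Nat) : Bool :=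
  match cs[i]?, cs[i+1]? with
  | some c, some d => (c == '.' || c == '!' || c == '?') && d == ' '
  | _, _ => false

-- B's loop 'for i in range(n - 1, -1, -1): if <sep at i>: return i' as descending recursion
def pvScan (cs : List Char) : Nat → Option Nat
  | 0 => none
  | n+1 => if pvSepAt cs n then some n else pvScan cs n

def last_sentence_py_alt (text : String) : String :=
  let t := PySem.Str.strip text
  match pvScan t.toList (t.toList.length - 1) with
  | some i => PySem.Str.strip (PySem.Str.slice t (some ((i : Int) + 2)) none)
  | none =>
    if (PySem.Str.len t : Int) > 200 then PySem.Str.slice t (some (-200)) none else t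

-- ===== PRECONDITION & SPEC =====
def Spec_last_sentence_py (text : String) (out : String) : Prop := out = last_sentence_py_alt text
instance (text : String) (out : String) : Decidable (Spec_last_sentence_py text out) := by unfold Spec_last_sentence_py; infer_instance

-- ===== CLAIM (what is proved, stated in full; the proofs are below) =====
def Claim_equal_last_sentence_py : Prop := ∀ (text : String), Dom_last_sentence_py text → Spec_last_sentence_py text (last_sentence_py text)

-- ===== LEMMAS AND PROOFS =====

lemma pvGo_zero (cs sub : List Char) :
    PySem.Chars.rfind.go cs sub 0 = if sub.isPrefixOf cs then 0 else -1 := by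
  simp [PySem.Chars.rfind.go]

lemma pvGo_succ (cs sub : List Char) (n : Nat) :
    PySem.Chars.rfind.go cs sub (n+1) =
      if sub.isPrefixOf (cs.drop (n+1)) then ((n : Int)+1) else PySem.Chars.rfind.go cs sub n := by
  simp [PySem.Chars.rfind.go]

lemma pvGo_le (cs sub : List Char) (n : Nat) : PySem.Chars.rfind.go cs sub n ≤ (n : Int) := by
  induction n with
  | zero => rw [pvGo_zero]; split <;> omega
  | succ n ih => rw [pvGo_succ]; split <;> push_cast <;> omega

-- pvSepAt matches exactly when one of the three 2-char separators is a prefix of cs.drop j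
lemma pvSepAt_iff (cs : List Char) (j : Nat) :
    pvSepAt cs j =
      (['.',' '].isPrefixOf (cs.drop j) || ['!',' '].isPrefixOf (cs.drop j)
        || ['?',' '].isPrefixOf (cs.drop j)) := by
  have h0 : cs[j]? = (cs.drop j)[0]? := by simp
  have h1 : cs[j+1]? = (cs.drop j)[1]? := by rw [List.getElem?_drop]
  unfold pvSepAt
  rw [h0, h1]
  rcases hd : cs.drop j with _ | ⟨c, _ | ⟨d, rest⟩⟩
  · simp [List.isPrefixOf]
  · simp [List.isPrefixOf]
  · simp [List.isPrefixOf]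
    by_cases hc : c = '.' <;> by_cases h2 : c = '!' <;> by_cases h3 : c = '?' <;>
      by_cases hdd : d = ' ' <;> simp_all [BEq.comm, Bool.and_or_distrib_right]

-- the running max of the three rfind scans down to index n equals B's scan of indices < n+1
lemma pvMain (cs : List Char) (n : Nat) :
    max (max (max (-1) (PySem.Chars.rfind.go cs ['.',' '] n))
          (PySem.Chars.rfind.go cs ['!',' '] n))
        (PySem.Chars.rfind.go cs ['?',' '] n)
      = (pvScan cs (n+1)).elim (-1) (fun j => (j : Int)) := by
  induction n with
  | zero =>
    rw [pvGo_zero, pvGo_zero, pvGo_zero]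
    have h := pvSepAt_iff cs 0
    simp only [List.drop_zero] at h
    show _ = (Option.elim (if pvSepAt cs 0 then some 0 else pvScan cs 0) _ _)
    by_cases h1 : ['.',' '].isPrefixOf cs <;> by_cases h2 : ['!',' '].isPrefixOf cs <;>
      by_cases h3 : ['?',' '].isPrefixOf cs <;>
        simp [h1, h2, h3] at h <;> simp [pvScan, h, h1, h2, h3]
  | succ n ih =>
    rw [pvGo_succ, pvGo_succ, pvGo_succ]
    have h := pvSepAt_iff cs (n+1)
    have l1 := pvGo_le cs ['.',' '] n
    have l2 := pvGo_le cs ['!',' '] n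
    have l3 := pvGo_le cs ['?',' '] n
    show _ = (Option.elim (if pvSepAt cs (n+1) then some (n+1) else pvScan cs (n+1)) _ _)
    by_cases h1 : ['.',' '].isPrefixOf (cs.drop (n+1)) <;>
      by_cases h2 : ['!',' '].isPrefixOf (cs.drop (n+1)) <;>
        by_cases h3 : ['?',' '].isPrefixOf (cs.drop (n+1)) <;>
          simp [h1, h2, h3] at h <;> simp [h, h1, h2, h3] <;>
            [skip;skip;skip;skip;skip;skip;skip;rw [← ih]] <;> push_cast <;> omega

-- indices ≥ len - 1 can never match (cs[m+1]? is out of range there)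
lemma pvScan_stable (cs : List Char) (m : Nat) (hm : cs.length ≤ m + 1) :
    pvScan cs (m+1) = pvScan cs m := by
  have hsep : pvSepAt cs m = false := by
    unfold pvSepAt
    have h2 : cs[m+1]? = none := by rw [List.getElem?_eq_none_iff]; omega
    rw [h2]
    rcases cs[m]? <;> rfl
  show (if pvSepAt cs m then some m else pvScan cs m) = pvScan cs m
  simp [hsep]

lemma pvScan_top (cs : List Char) :
    pvScan cs (cs.length + 1) = pvScan cs (cs.length - 1) := by
  rcases hn : cs.length with _ | k
  · rw [show (0+1 : Nat) = 0+1 from rfl, pvScan_stable cs 0 (by omega)]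
  · rw [pvScan_stable cs (k+1) (by omega)]
    rw [show pvScan cs (k+1) = pvScan cs (k+1) from rfl]
    rw [pvScan_stable cs k (by omega)]
    simp

-- A's fold step 'if idx > last then idx else last' is max
lemma pvIfMax (a b : Int) : (if a > b then a else b) = max b a := by
  rcases lt_or_ge b a with h | h
  · rw [if_pos h, max_eq_right h.le]
  · rw [if_neg (not_lt.mpr h), max_eq_left h]

lemma pvEq (text : String) : last_sentence_py text = last_sentence_py_alt text := by
  unfold last_sentence_py last_sentence_py_alt
  simp only [List.foldl_cons, List.foldl_nil, PySem.Str.rfind_eq, PySem.Chars.rfind, pvIfMax,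
    show ". ".toList = ['.',' '] from rfl, show "! ".toList = ['!',' '] from rfl,
    show "? ".toList = ['?',' '] from rfl]
  have hmax := pvMain (PySem.Str.strip text).toList (PySem.Str.strip text).toList.length
  rw [pvScan_top] at hmax
  rcases hscan : pvScan (PySem.Str.strip text).toList ((PySem.Str.strip text).toList.length - 1)
    with _ | j <;> rw [hscan] at hmax <;> simp only [Option.elim] at hmax <;> rw [hmax]
  · norm_num
  · norm_num

-- ===== VERDICT (by name: the statement is the Claim_ definition above) =====
theorem last_sentence_py_spec : Claim_equal_last_sentence_py := by
  intro text _
  unfold Spec_last_sentence_py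
  exact pvEq text
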